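-- pv_equiv track=rewrite | github.com/YellowRiver2001/EgoDiarization | mytools/voice2id_final.py | expand_time_segments
-- ===== SOURCE A (Python) =====
-- def expand_time_segments(input_segments, total_range):
-- 	# 对输入的时间区间列表按起始时间排序
-- 	input_segments.sort()
--
-- 	full_segments = []
-- 	current_start, current_end = total_range[0], total_range[1]
--
-- 	# 处理输入的时间区间列表
-- 	for start, end in input_segments:
--
-- 		if start > current_end:
-- 			# 如果当前时间段的起始时间大于当前总时间范围的结束时间，结束循环
-- 			break
--
-- 		if start > current_start:
-- 			# 添加不在输入时间区间但在总时间范围内的时间段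
-- 			full_segments.append([current_start, start - 1])
-- 			# full_segments.append((start,end))
-- 		# 更新当前总时间范围的起始时间
-- 		current_start = max(end + 1, current_start)
--
-- 	# 添加剩余的时间范围
-- 	if current_start <= current_end:
-- 		full_segments.append([current_start, current_end])
--
-- 	return full_segments
-- ===== SOURCE B (Python) =====
-- def expand_time_segments(input_segments, total_range):
--     # same in-place sort of the argument as A
--     input_segments.sort()
--     range_start, range_end = total_range[0], total_range[1]
--     # pass 1: merge the sorted intervals into maximal covered blocks
--     # (a following interval merges when it starts at or before block_end + 1)
--     merged = []
--     for start, end in input_segments: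
--         if merged and start <= merged[-1][1] + 1:
--             merged[-1][1] = max(merged[-1][1], end)
--         else:
--             merged.append([start, end])
--     # pass 2: walk the covered blocks and emit the complement gaps
--     gaps = []
--     cursor = range_start
--     for start, end in merged:
--         if start > range_end:
--             break
--         if start > cursor:
--             gaps.append([cursor, start - 1])
--         cursor = max(end + 1, cursor)
--     if cursor <= range_end:
--         gaps.append([cursor, range_end])
--     return gaps
-- ===== Notes on version B (the rewrite author's own statement) =====
-- stated objective: alternative
-- what changed: B replaces A's single fused loop (gap emission interleaved with a running cursor over raw sorted intervals) by two passes: first merge the sorted intervals into maximal covered blocks (merging on adjacency start <= block_end+1), then emit the complement gaps by scanning the disjoint blocks.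
import Mathlib
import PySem

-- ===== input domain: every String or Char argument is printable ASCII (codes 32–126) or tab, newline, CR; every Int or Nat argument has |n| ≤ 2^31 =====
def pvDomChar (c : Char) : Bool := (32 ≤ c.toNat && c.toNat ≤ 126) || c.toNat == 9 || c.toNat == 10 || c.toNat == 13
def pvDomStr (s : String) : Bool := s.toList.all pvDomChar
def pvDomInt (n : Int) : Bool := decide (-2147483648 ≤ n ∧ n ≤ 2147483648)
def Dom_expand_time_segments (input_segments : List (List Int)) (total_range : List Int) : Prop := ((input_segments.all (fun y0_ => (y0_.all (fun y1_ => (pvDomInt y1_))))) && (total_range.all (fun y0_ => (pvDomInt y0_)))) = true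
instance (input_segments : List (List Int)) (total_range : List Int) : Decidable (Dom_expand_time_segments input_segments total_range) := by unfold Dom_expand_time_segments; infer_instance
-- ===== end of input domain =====

-- B merges the sorted intervals into maximal covered blocks first, then emits the
-- complement gaps from the disjoint blocks (two passes instead of A's fused loop).
-- Both A and B sort input_segments IN PLACE; the equivalence proved here is about
-- the return value (the observable mutation is identical anyway: both call .sort()).

-- ===== PORT A =====
-- A's loop over the sorted intervals, with the trailing "remaining range" append
-- (the break and the fall-through of the loop both end in the same final if).
def pvLoopA : List (List Int) → Int → Int → List (List Int) → List (List Int)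
  | [], cs, ce, acc => if cs ≤ ce then acc ++ [[cs, ce]] else acc
  | seg :: rest, cs, ce, acc =>
    match seg with
    | [s, e] =>
      if s > ce then (if cs ≤ ce then acc ++ [[cs, ce]] else acc)
      else pvLoopA rest (max (e + 1) cs) ce (if s > cs then acc ++ [[cs, s - 1]] else acc)
    | _ => acc  -- Python raises ValueError unpacking a non-pair; outside Pre_

def expand_time_segments (input_segments : List (List Int)) (total_range : List Int) : List (List Int) :=
  match total_range with
  | t0 :: t1 :: _ => pvLoopA (PySem.List.sorted input_segments (fun x => x) false) t0 t1 []
  | _ => []  -- Python raises IndexError on total_range[0] / total_range[1]; outside Pre_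

-- ===== PORT B =====
-- pass 1: merge sorted intervals into maximal covered blocks, carrying the open block (s, e)
-- (Source B's merged[-1] mutation pattern: merge when the next start is ≤ block end + 1).
def pvMergeGo (s e : Int) : List (List Int) → List (List Int)
  | [] => [[s, e]]
  | seg :: rest =>
    match seg with
    | [s2, e2] =>
      if s2 ≤ e + 1 then pvMergeGo s (max e e2) rest
      else [s, e] :: pvMergeGo s2 e2 rest
    | _ => [[s, e]]  -- Python raises ValueError unpacking a non-pair; outside Pre_

def pvMerge : List (List Int) → List (List Int)
  | [] => []
  | seg :: rest => match seg with | [s, e] => pvMergeGo s e rest | _ => []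

-- pass 2: emit the complement gaps between the covered blocks
def pvEmit : List (List Int) → Int → Int → List (List Int) → List (List Int)
  | [], cursor, rend, gaps => if cursor ≤ rend then gaps ++ [[cursor, rend]] else gaps
  | blk :: rest, cursor, rend, gaps =>
    match blk with
    | [s, e] =>
      if s > rend then (if cursor ≤ rend then gaps ++ [[cursor, rend]] else gaps)
      else pvEmit rest (max (e + 1) cursor) rend (if s > cursor then gaps ++ [[cursor, s - 1]] else gaps)
    | _ => gaps

def expand_time_segments_alt (input_segments : List (List Int)) (total_range : List Int) : List (List Int) :=
  match total_range with
  | t0 :: t1 :: _ => pvEmit (pvMerge (PySem.List.sorted input_segments (fun x => x) false)) t0 t1 []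
  | _ => []

-- ===== PRECONDITION & SPEC =====
-- Pre_ excludes exactly the inputs where A raises: total_range shorter than 2
-- (IndexError on total_range[1]) or a segment that is not a 2-element list
-- (ValueError unpacking "for start, end in input_segments").
def Pre_expand_time_segments (input_segments : List (List Int)) (total_range : List Int) : Prop :=
  2 ≤ total_range.length ∧ ∀ seg ∈ input_segments, seg.length = 2
instance (input_segments : List (List Int)) (total_range : List Int) : Decidable (Pre_expand_time_segments input_segments total_range) := by unfold Pre_expand_time_segments; infer_instance

def pvWitness_expand_time_segments : List (List Int) × List Int := ([[1, 2], [5, 6]], [0, 10])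

def Spec_expand_time_segments (input_segments : List (List Int)) (total_range : List Int) (out : List (List Int)) : Prop := out = expand_time_segments_alt input_segments total_range
instance (input_segments : List (List Int)) (total_range : List Int) (out : List (List Int)) : Decidable (Spec_expand_time_segments input_segments total_range out) := by unfold Spec_expand_time_segments; infer_instance

-- ===== CLAIM (what is proved, stated in full; the proofs are below) =====
def Claim_equal_expand_time_segments : Prop := ∀ (input_segments : List (List Int)) (total_range : List Int), Dom_expand_time_segments input_segments total_range → Pre_expand_time_segments input_segments total_range → Spec_expand_time_segments input_segments total_range (expand_time_segments input_segments total_range)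

-- ===== LEMMAS AND PROOFS =====

-- Once the cursor has passed the range end, A's loop adds nothing more.
lemma pvLoopA_past_end (L : List (List Int)) : ∀ (c ce : Int) (acc : List (List Int)),
    (∀ seg ∈ L, seg.length = 2) → ce < c → pvLoopA L c ce acc = acc := by
  induction L with
  | nil => intro c ce acc _ h; simp [pvLoopA]; omega
  | cons seg rest ih =>
    intro c ce acc hlen h
    have h2 := hlen seg (by simp)
    match seg, h2 with
    | [s, e], _ =>
      simp only [pvLoopA]
      by_cases hs : s > ce
      · simp [hs]; omega
      · have hng : ¬ s > c := by omega
        simp only [hs, if_false]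
        rw [if_neg hng]
        exact ih _ _ _ (fun x hx => hlen x (by simp [hx])) (by omega)

-- Core: A's loop over a group headed by (s, e) equals B's emission over the merged blocks.
lemma pvLoopA_eq_emit_mergeGo (rest : List (List Int)) : ∀ (s e c ce : Int) (acc : List (List Int)),
    (∀ seg ∈ rest, seg.length = 2) →
    pvLoopA ([s, e] :: rest) c ce acc = pvEmit (pvMergeGo s e rest) c ce acc := by
  induction rest with
  | nil => intro s e c ce acc _; simp [pvLoopA, pvMergeGo, pvEmit]
  | cons seg rest' ih =>
    intro s e c ce acc hlen
    have h2 := hlen seg (by simp)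
    have hlen' : ∀ x ∈ rest', x.length = 2 := fun x hx => hlen x (by simp [hx])
    match seg, h2 with
    | [s2, e2], _ =>
      simp only [pvMergeGo]
      by_cases hm : s2 ≤ e + 1
      · -- merge case: the two head intervals collapse into one block
        rw [if_pos hm, ← ih s (max e e2) c ce acc hlen']
        simp only [pvLoopA]
        by_cases hs : s > ce
        · simp [hs]
        · rw [if_neg hs, if_neg hs]
          by_cases hs2 : s2 > ce
          · -- A breaks here with its cursor already past ce; both sides return acc'
            rw [if_pos hs2]
            have hc1 : ce < max (e + 1) c := by omega
            rw [if_neg (by omega : ¬ max (e + 1) c ≤ ce)]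
            rw [pvLoopA_past_end rest' _ _ _ hlen' (by omega)]
          · rw [if_neg hs2]
            have hng : ¬ s2 > max (e + 1) c := by omega
            rw [if_neg hng]
            have : max (e2 + 1) (max (e + 1) c) = max (max e e2 + 1) c := by omega
            rw [this]
      · -- no merge: (s, e) is a finished block, recurse on the tail group
        rw [if_neg hm]
        simp only [pvLoopA, pvEmit]
        by_cases hs : s > ce
        · simp [hs]
        · rw [if_neg hs, if_neg hs]
          exact ih s2 e2 (max (e + 1) c) ce _ hlen'

lemma pvLoopA_eq_emit_merge (L : List (List Int)) (c ce : Int)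
    (hlen : ∀ seg ∈ L, seg.length = 2) :
    pvLoopA L c ce [] = pvEmit (pvMerge L) c ce [] := by
  match L with
  | [] => simp [pvMerge, pvLoopA, pvEmit]
  | seg :: rest =>
    have h2 := hlen seg (by simp)
    match seg, h2 with
    | [s, e], _ =>
      simp only [pvMerge]
      exact pvLoopA_eq_emit_mergeGo rest s e c ce [] (fun x hx => hlen x (by simp [hx]))

-- ===== VERDICT (by name: the statement is the Claim_ definition above) =====
theorem expand_time_segments_spec : Claim_equal_expand_time_segments := by
  intro input_segments total_range _ hpre
  unfold Spec_expand_time_segments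
  obtain ⟨hlen2, hsegs⟩ := hpre
  match total_range, hlen2 with
  | t0 :: t1 :: _, _ =>
    simp only [expand_time_segments, expand_time_segments_alt]
    exact pvLoopA_eq_emit_merge _ t0 t1
      (fun x hx => hsegs x ((PySem.List.mem_sorted _ _ _ _).1 hx))
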